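-- pv_equiv track=rewrite | github.com/Dortheay/TestTailor | tests/sample_target_v2.py | mixed_constructs
-- ===== SOURCE A (Python) =====
-- def mixed_constructs(k):
--     total = 0
--
--     for i in range(k):
--         total += i
--
--     try:
--         if total > 50:
--             total = total // 2
--         else:
--             total += 5
--     except Exception:
--         total = -1
--
--     while total < 100:
--         total += 10
--
--     return total
-- ===== SOURCE B (Python) =====
-- def mixed_constructs(k):
--     # closed-form: sum(range(k)) = k*(k-1)//2 for k >= 0, 0 for k < 0
--     t = k * (k - 1) // 2 if k > 1 else 0
--     t = t // 2 if t > 50 else t + 5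
--     if t < 100:
--         t += (100 - t + 9) // 10 * 10
--     return t
-- ===== Notes on version B (the rewrite author's own statement) =====
-- stated objective: faster
-- what changed: Replaces the linear summation loop with the closed-form triangular-number formula and the increment-by-ten while-loop with ceiling arithmetic, making the function constant-time.
import Mathlib
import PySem

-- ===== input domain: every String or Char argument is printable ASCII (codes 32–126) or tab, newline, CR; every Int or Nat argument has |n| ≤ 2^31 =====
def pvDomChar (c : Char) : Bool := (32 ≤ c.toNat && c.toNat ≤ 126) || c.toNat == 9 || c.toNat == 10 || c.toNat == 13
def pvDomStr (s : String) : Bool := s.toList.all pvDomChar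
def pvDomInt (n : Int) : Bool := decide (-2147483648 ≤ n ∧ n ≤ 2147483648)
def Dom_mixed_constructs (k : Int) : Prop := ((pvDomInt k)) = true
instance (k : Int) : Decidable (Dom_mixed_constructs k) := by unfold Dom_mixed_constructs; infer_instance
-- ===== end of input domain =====

-- B replaces A's O(k) summation loop with the closed form k*(k-1)//2 and the
-- while-loop with ceiling arithmetic (objective: faster, O(1) vs O(k)).

-- ===== PORT A =====
-- 'while total < 100: total += 10' as structural recursion on (100 - total).toNat
def mixedWhileA (t : Int) : Int :=
  if t < 100 then mixedWhileA (t + 10) else t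
termination_by (100 - t).toNat
decreasing_by omega

def mixed_constructs (k : Int) : Int :=
  let total := (PySem.List.pyRange 0 k 1).foldl (fun acc i => acc + i) 0
  let total := if total > 50 then PySem.Int.floordiv total 2 else total + 5
  mixedWhileA total

-- ===== PORT B =====
def mixed_constructs_alt (k : Int) : Int :=
  let t := if k > 1 then PySem.Int.floordiv (k * (k - 1)) 2 else 0
  let t := if t > 50 then PySem.Int.floordiv t 2 else t + 5
  if t < 100 then t + PySem.Int.floordiv (100 - t + 9) 10 * 10 else t

-- ===== PRECONDITION & SPEC =====
def Spec_mixed_constructs (k : Int) (out : Int) : Prop := out = mixed_constructs_alt k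
instance (k : Int) (out : Int) : Decidable (Spec_mixed_constructs k out) := by unfold Spec_mixed_constructs; infer_instance

-- ===== CLAIM (what is proved, stated in full; the proofs are below) =====
def Claim_equal_mixed_constructs : Prop := ∀ (k : Int), Dom_mixed_constructs k → Spec_mixed_constructs k (mixed_constructs k)

-- ===== LEMMAS AND PROOFS =====

-- the summation loop doubled equals n*(n-1)
theorem pvSumRange_double (n : Nat) :
    2 * ((PySem.List.pyRange 0 (n : Int) 1).foldl (fun acc i => acc + i) 0) = (n : Int) * ((n : Int) - 1) := by
  induction n with
  | zero => simp [PySem.List.pyRange_one_eq_nil]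
  | succ m ih =>
    have h : ((m + 1 : Nat) : Int) = (m : Int) + 1 := by push_cast; ring
    rw [h, PySem.List.pyRange_one_succ_right (by positivity), List.foldl_append]
    simp only [List.foldl_cons, List.foldl_nil]
    nlinarith [ih]

-- closed form of the summation loop (for any Int k)
theorem pvSumRange_closed (k : Int) :
    (PySem.List.pyRange 0 k 1).foldl (fun acc i => acc + i) 0 =
      (if k > 1 then PySem.Int.floordiv (k * (k - 1)) 2 else 0) := by
  split
  · next hk =>
    obtain ⟨n, hn⟩ : ∃ n : Nat, k = (n : Int) := ⟨k.toNat, by omega⟩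
    subst hn
    have hd := pvSumRange_double n
    rw [PySem.Int.floordiv_eq_ediv_of_pos (by norm_num)]
    omega
  · next hk =>
    rcases le_or_gt k 0 with h | h
    · rw [PySem.List.pyRange_one_eq_nil h]; rfl
    · have : k = 1 := by omega
      subst this
      decide

-- closed form of the while-loop
theorem pvWhileA_closed (t : Int) :
    mixedWhileA t = if t < 100 then t + PySem.Int.floordiv (100 - t + 9) 10 * 10 else t := by
  rw [mixedWhileA]
  split
  · next h =>
    rw [pvWhileA_closed (t + 10),
        PySem.Int.floordiv_eq_ediv_of_pos (a := 100 - (t + 10) + 9) (by norm_num),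
        PySem.Int.floordiv_eq_ediv_of_pos (a := 100 - t + 9) (by norm_num)]
    split
    · next h2 => omega
    · next h2 => omega
  · next h => rfl
termination_by (100 - t).toNat
decreasing_by omega

-- ===== VERDICT (by name: the statement is the Claim_ definition above) =====
theorem mixed_constructs_spec : Claim_equal_mixed_constructs := by
  intro k _
  unfold Spec_mixed_constructs mixed_constructs mixed_constructs_alt
  rw [pvSumRange_closed, pvWhileA_closed]
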